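-- pv_equiv track=rewrite | github.com/daniel-reich/ubiquitous-fiesta | E8c4ZMwme85YX3wM7_13.py | recaman
-- ===== SOURCE A (Python) =====
-- def recaman(n):
--     seq = []
--     duplicates = []
--     if n > 0:
--         seq.append(0)
--         for idx in range(1, n):
--             x = seq[-1] - idx
--             if x > 0 and x not in seq:
--                 seq.append(x)
--             else:
--                 seq.append(seq[-1] + idx)
--     for idx, x in enumerate(seq):
--         if x in seq[:idx] and x not in duplicates:
--             duplicates.append(x)
--     return ('---> Recaman\'s sequence: {}\n---> Duplicates for n = {}: {}'
--             .format(seq, n, duplicates))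
-- ===== SOURCE B (Python) =====
-- def recaman(n):
--     seq = []
--     duplicates = []
--     seen = {}
--
--     def push(v):
--         seq.append(v)
--         c = seen.get(v, 0) + 1
--         seen[v] = c
--         if c == 2:
--             duplicates.append(v)
--
--     if n > 0:
--         push(0)
--         for idx in range(1, n):
--             x = seq[-1] - idx
--             if x > 0 and x not in seen:
--                 push(x)
--             else:
--                 push(seq[-1] + idx)
--     return ('---> Recaman\'s sequence: {}\n---> Duplicates for n = {}: {}'
--             .format(seq, n, duplicates))
-- ===== Notes on version B (the rewrite author's own statement) =====
-- stated objective: faster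
-- what changed: Duplicate detection is fused into the generation loop via a value-to-count dict (a value is recorded when its count reaches 2), eliminating A's separate quadratic enumerate/slice pass and the O(n) 'x in seq' membership scans.
import Mathlib
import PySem

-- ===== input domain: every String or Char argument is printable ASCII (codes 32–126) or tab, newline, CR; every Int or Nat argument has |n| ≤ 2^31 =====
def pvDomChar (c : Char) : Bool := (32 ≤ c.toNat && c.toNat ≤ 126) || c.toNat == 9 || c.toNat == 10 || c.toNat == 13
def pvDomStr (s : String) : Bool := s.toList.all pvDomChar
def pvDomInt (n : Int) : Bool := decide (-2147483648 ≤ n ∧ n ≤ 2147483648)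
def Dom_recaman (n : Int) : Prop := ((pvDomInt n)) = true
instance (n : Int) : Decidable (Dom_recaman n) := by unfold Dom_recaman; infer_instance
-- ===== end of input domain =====

-- B fuses duplicate detection into the generation loop with a value→count dict,
-- removing A's separate quadratic second pass (and the linear membership scans).

-- shared output formatting (identical .format call in both Pythons)
def pyShowIntList (xs : List Int) : String :=
  "[" ++ PySem.Str.join ", " (xs.map PySem.Int.toStr) ++ "]"

def recamanFmt (seq : List Int) (n : Int) (dups : List Int) : String :=
  "---> Recaman's sequence: " ++ pyShowIntList seq ++
  "\n---> Duplicates for n = " ++ PySem.Int.toStr n ++ ": " ++ pyShowIntList dups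

-- ===== PORT A =====
-- generation step: x = seq[-1] - idx; append x if x > 0 and x not in seq, else seq[-1] + idx
def recamanStepA (seq : List Int) (idx : Int) : List Int :=
  let x := (PySem.List.pyGet? seq (-1)).getD 0 - idx
  if x > 0 && !(seq.contains x) then seq ++ [x]
  else seq ++ [(PySem.List.pyGet? seq (-1)).getD 0 + idx]

def recaman (n : Int) : String :=
  let seq : List Int := if n > 0 then (PySem.List.pyRange 1 n 1).foldl recamanStepA [0] else []
  let dups : List Int :=
    (PySem.List.enumerate seq).foldl
      (fun d p =>
        if (PySem.List.slice seq none (some p.1)).contains p.2 && !(d.contains p.2)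
        then d ++ [p.2] else d) []
  recamanFmt seq n dups

-- ===== PORT B =====
-- state: (seq, duplicates, seen); push appends v, bumps its count, records a second occurrence
def recamanPush (st : List Int × List Int × PySem.Dict Int Int) (v : Int) :
    List Int × List Int × PySem.Dict Int Int :=
  let c := st.2.2.getD v 0 + 1
  (st.1 ++ [v], if c = 2 then st.2.1 ++ [v] else st.2.1, st.2.2.insert v c)

def recamanStepB (st : List Int × List Int × PySem.Dict Int Int) (idx : Int) :
    List Int × List Int × PySem.Dict Int Int :=
  let x := (PySem.List.pyGet? st.1 (-1)).getD 0 - idx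
  if x > 0 && !(st.2.2.contains x) then recamanPush st x
  else recamanPush st ((PySem.List.pyGet? st.1 (-1)).getD 0 + idx)

def recaman_alt (n : Int) : String :=
  let st : List Int × List Int × PySem.Dict Int Int :=
    if n > 0 then
      (PySem.List.pyRange 1 n 1).foldl recamanStepB (recamanPush ([], [], PySem.Dict.empty) 0)
    else ([], [], PySem.Dict.empty)
  recamanFmt st.1 n st.2.1

-- ===== PRECONDITION & SPEC =====
def Spec_recaman (n : Int) (out : String) : Prop := out = recaman_alt n
instance (n : Int) (out : String) : Decidable (Spec_recaman n out) := by unfold Spec_recaman; infer_instance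

-- ===== CLAIM (what is proved, stated in full; the proofs are below) =====
def Claim_equal_recaman : Prop := ∀ (n : Int), Dom_recaman n → Spec_recaman n (recaman n)

-- ===== LEMMAS AND PROOFS =====

-- A's second pass, restated as a prefix-carrying fold
def dupStep2 (st : List Int × List Int) (x : Int) : List Int × List Int :=
  (st.1 ++ [x], if st.1.contains x && !(st.2.contains x) then st.2 ++ [x] else st.2)

def dupsOf (s : List Int) : List Int := (s.foldl dupStep2 ([], [])).2

lemma foldl_dupStep2_fst (s : List Int) (pre d : List Int) :
    (s.foldl dupStep2 (pre, d)).1 = pre ++ s := by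
  induction s generalizing pre d with
  | nil => simp
  | cons x rest ih => simp [dupStep2, ih]

-- A's enumerate/slice loop equals the prefix fold
lemma enum_fold_eq_dupsOf_aux (rest : List Int) (pre d : List Int) :
    (PySem.List.enumerate rest (pre.length : Int)).foldl
      (fun d p =>
        if (PySem.List.slice (pre ++ rest) none (some p.1)).contains p.2 && !(d.contains p.2)
        then d ++ [p.2] else d) d
    = (rest.foldl dupStep2 (pre, d)).2 := by
  induction rest generalizing pre d with
  | nil => simp
  | cons x rest ih =>
    rw [PySem.List.enumerate_cons]
    simp only [List.foldl_cons]
    have hsl : PySem.List.slice (pre ++ x :: rest) none (some (pre.length : Int)) = pre := by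
      rw [PySem.List.slice_to_natCast]
      simp
    rw [hsl]
    have hre : pre ++ x :: rest = (pre ++ [x]) ++ rest := by simp
    have hlen : (pre.length : Int) + 1 = ((pre ++ [x]).length : Int) := by
      simp
    rw [hre, hlen, ih]
    simp [dupStep2]

lemma enum_fold_eq_dupsOf (s : List Int) :
    (PySem.List.enumerate s).foldl
      (fun d p =>
        if (PySem.List.slice s none (some p.1)).contains p.2 && !(d.contains p.2)
        then d ++ [p.2] else d) ([] : List Int)
    = dupsOf s := by
  have h := enum_fold_eq_dupsOf_aux s [] []
  simpa [dupsOf, PySem.List.enumerate] using h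

-- append form of dupsOf
lemma dupsOf_append (s : List Int) (v : Int) :
    dupsOf (s ++ [v]) =
      if s.contains v && !((dupsOf s).contains v) then dupsOf s ++ [v] else dupsOf s := by
  unfold dupsOf
  rw [List.foldl_append]
  have h1 := foldl_dupStep2_fst s [] []
  simp only [List.foldl_cons, List.foldl_nil, dupStep2]
  rw [h1]
  simp

-- the joint invariant between A's generated sequence and B's state
def RecInv (seq : List Int) (st : List Int × List Int × PySem.Dict Int Int) : Prop :=
  st.1 = seq ∧ st.2.1 = dupsOf seq ∧
  (∀ v, st.2.2.getD v 0 = (seq.count v : Int)) ∧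
  (∀ v, st.2.2.contains v = seq.contains v) ∧
  (∀ v, (dupsOf seq).contains v = decide (2 ≤ seq.count v))

lemma recInv_push (seq : List Int) (st : List Int × List Int × PySem.Dict Int Int) (v : Int)
    (h : RecInv seq st) : RecInv (seq ++ [v]) (recamanPush st v) := by
  obtain ⟨h1, h2, h3, h4, h5⟩ := h
  have hc : st.2.2.getD v 0 + 1 = (seq.count v : Int) + 1 := by rw [h3]
  have hsc : seq.contains v = decide (1 ≤ seq.count v) := by
    by_cases hm : v ∈ seq
    · simp [hm, List.one_le_count_iff.mpr hm]
    · simp [hm, List.count_eq_zero.mpr hm]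
  have hcond : (seq.contains v && !((dupsOf seq).contains v)) = decide (seq.count v = 1) := by
    rw [h5 v, hsc]
    by_cases h2le : 2 ≤ seq.count v
    · have h1le : 1 ≤ seq.count v := by omega
      have hne : ¬ seq.count v = 1 := by omega
      simp [h2le, hne]
    · by_cases h1le : 1 ≤ seq.count v
      · have heq : seq.count v = 1 := by omega
        simp [heq]
      · have h0 : seq.count v = 0 := by omega
        simp [h0]
  have hdup : dupsOf (seq ++ [v]) =
      if seq.count v = 1 then dupsOf seq ++ [v] else dupsOf seq := by
    rw [dupsOf_append, hcond]
    by_cases h : seq.count v = 1 <;> simp [h]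
  refine ⟨by simp [recamanPush, h1], ?_, ?_, ?_, ?_⟩
  · simp only [recamanPush, hc, hdup, h2]
    by_cases h : seq.count v = 1
    · simp [h]
    · have : ¬ ((seq.count v : Int) + 1 = 2) := by omega
      simp [h, this]
  · intro w
    simp only [recamanPush, PySem.Dict.getD_insert, hc]
    by_cases hw : w = v
    · subst hw; simp [List.count_append]
    · have hw' : ¬ v = w := fun e => hw e.symm
      simp [hw, hw', h3 w, List.count_append]
  · intro w
    simp only [recamanPush, PySem.Dict.contains_insert]
    by_cases hw : w = v
    · subst hw; simp
    · simp [hw, h4 w]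
  · intro w
    rw [hdup]
    by_cases hw : w = v
    · subst hw
      by_cases h : seq.count w = 1
      · simp [h, List.count_append]
      · rw [if_neg h, h5 w]
        simp only [List.count_append, List.count_singleton]
        by_cases h2 : 2 ≤ seq.count w
        · have h2' : 2 ≤ seq.count w + 1 := by omega
          simp [h2, h2']
        · have h0 : seq.count w = 0 := by omega
          simp [h0]
    · have hw' : ¬ v = w := fun e => hw e.symm
      have hcnt : List.count w (seq ++ [v]) = List.count w seq := by
        simp [List.count_append, hw']
      have h5w : (w ∈ dupsOf seq) ↔ 2 ≤ List.count w seq := by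
        have := h5 w; simpa [List.contains_iff_mem] using this
      by_cases h : seq.count v = 1 <;>
        simp [h, hcnt, h5w, hw]

lemma recInv_step (seq : List Int) (st : List Int × List Int × PySem.Dict Int Int) (idx : Int)
    (h : RecInv seq st) : RecInv (recamanStepA seq idx) (recamanStepB st idx) := by
  obtain ⟨h1, h2, h3, h4, h5⟩ := h
  unfold recamanStepA recamanStepB
  rw [h1]
  have hcond : ∀ x, (st.2.2.contains x) = (seq.contains x) := h4
  simp only [hcond]
  split_ifs with hx
  · exact recInv_push seq st _ ⟨h1, h2, h3, h4, h5⟩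
  · exact recInv_push seq st _ ⟨h1, h2, h3, h4, h5⟩

lemma recInv_foldl (l : List Int) (seq : List Int) (st : List Int × List Int × PySem.Dict Int Int)
    (h : RecInv seq st) : RecInv (l.foldl recamanStepA seq) (l.foldl recamanStepB st) := by
  induction l generalizing seq st with
  | nil => exact h
  | cons i rest ih => exact ih _ _ (recInv_step seq st i h)

lemma recInv_nil : RecInv ([] : List Int) (([], [], PySem.Dict.empty)) := by
  refine ⟨rfl, rfl, ?_, ?_, ?_⟩ <;> intro v <;> simp [dupsOf, PySem.Dict.getD_empty, PySem.Dict.contains_empty]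

lemma recInv_init : RecInv [0] (recamanPush ([], [], PySem.Dict.empty) 0) := by
  have h := recInv_push [] ([], [], PySem.Dict.empty) 0 recInv_nil
  simpa using h

-- ===== VERDICT (by name: the statement is the Claim_ definition above) =====
theorem recaman_spec : Claim_equal_recaman := by
  intro n _
  unfold Spec_recaman recaman recaman_alt
  by_cases hn : n > 0
  · simp only [hn, if_true]
    have hinv := recInv_foldl (PySem.List.pyRange 1 n 1) [0]
      (recamanPush ([], [], PySem.Dict.empty) 0) recInv_init
    obtain ⟨h1, h2, _, _, _⟩ := hinv
    rw [enum_fold_eq_dupsOf, h1, h2]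
  · simp only [hn, if_false]
    rw [enum_fold_eq_dupsOf]
    simp [dupsOf]
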